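-- pv_equiv track=rewrite | github.com/kappy59/aventofcode2023 | 2023/11.py | expand_galaxies
-- ===== SOURCE A (Python) =====
-- def expand_galaxies(empty_rows, empty_cols, galaxies, stretch_factor):
--     """Strech factor is: how many rows does one row become (similary for cols)"""
--     expanded_galaxies = [
--         (
--             g[0] + sum([1 for r in empty_rows if r < g[0]]) * (stretch_factor - 1),
--             g[1] + sum([1 for c in empty_cols if c < g[1]]) * (stretch_factor - 1),
--         )
--         for g in galaxies
--     ]
--     return expanded_galaxies
-- ===== SOURCE B (Python) =====
-- def expand_galaxies(empty_rows, empty_cols, galaxies, stretch_factor):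
--     """Sort the empty rows/cols once, then binary-search per galaxy to count
--     preceding empties (faster than rescanning the full lists per galaxy)."""
--     rows = sorted(empty_rows)
--     cols = sorted(empty_cols)
--     k = stretch_factor - 1
--
--     def count_less(a, x):
--         lo, hi = 0, len(a)
--         while lo < hi:
--             mid = (lo + hi) // 2
--             if a[mid] < x:
--                 lo = mid + 1
--             else:
--                 hi = mid
--         return lo
--
--     return [(r + count_less(rows, r) * k, c + count_less(cols, c) * k)
--             for r, c in galaxies]
-- ===== Notes on version B (the rewrite author's own statement) =====
-- stated objective: faster
-- what changed: Instead of rescanning the full empty_rows/empty_cols lists for every galaxy, B sorts each list once and counts preceding empties with a hand-written binary search per galaxy.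
import Mathlib
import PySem

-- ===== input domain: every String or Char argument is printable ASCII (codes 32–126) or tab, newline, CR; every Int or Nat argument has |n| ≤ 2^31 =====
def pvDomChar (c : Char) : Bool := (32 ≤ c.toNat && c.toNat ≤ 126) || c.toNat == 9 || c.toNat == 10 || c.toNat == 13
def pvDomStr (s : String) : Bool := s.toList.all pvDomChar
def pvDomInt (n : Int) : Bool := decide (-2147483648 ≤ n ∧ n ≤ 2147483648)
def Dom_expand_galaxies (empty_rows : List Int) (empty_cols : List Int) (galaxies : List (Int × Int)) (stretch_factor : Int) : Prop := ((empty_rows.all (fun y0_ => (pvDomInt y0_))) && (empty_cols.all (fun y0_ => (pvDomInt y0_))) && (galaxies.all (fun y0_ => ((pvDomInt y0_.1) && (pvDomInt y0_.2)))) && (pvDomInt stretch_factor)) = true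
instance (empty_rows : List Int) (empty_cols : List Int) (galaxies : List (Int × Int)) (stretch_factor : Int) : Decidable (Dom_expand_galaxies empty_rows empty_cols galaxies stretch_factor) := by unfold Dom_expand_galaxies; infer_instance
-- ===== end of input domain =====

-- B sorts the empty-row/col lists once and counts preceding empties by binary search instead of rescanning per galaxy (faster).
-- ===== PORT A =====
def expand_galaxies (empty_rows : List Int) (empty_cols : List Int) (galaxies : List (Int × Int)) (stretch_factor : Int) : List (Int × Int) :=
  galaxies.map (fun g =>
    (g.1 + ((empty_rows.filter (fun r => decide (r < g.1))).map (fun _ => (1 : Int))).sum * (stretch_factor - 1),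
     g.2 + ((empty_cols.filter (fun c => decide (c < g.2))).map (fun _ => (1 : Int))).sum * (stretch_factor - 1)))

-- ===== PORT B =====
-- hand-written binary search from Source B (count of elements < x in a sorted list), step for step
def countLessAux (a : List Int) (x : Int) (lo hi : Nat) : Nat :=
  if _h : lo < hi then
    let mid := (lo + hi) / 2
    if a.getD mid 0 < x then countLessAux a x (mid + 1) hi
    else countLessAux a x lo mid
  else lo
termination_by hi - lo
decreasing_by all_goals omega

def countLess (a : List Int) (x : Int) : Nat := countLessAux a x 0 a.length

def expand_galaxies_alt (empty_rows : List Int) (empty_cols : List Int) (galaxies : List (Int × Int)) (stretch_factor : Int) : List (Int × Int) :=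
  let rows := PySem.List.sorted empty_rows (fun v => v) false
  let cols := PySem.List.sorted empty_cols (fun v => v) false
  let k := stretch_factor - 1
  galaxies.map (fun g =>
    (g.1 + (countLess rows g.1 : Int) * k, g.2 + (countLess cols g.2 : Int) * k))

-- ===== PRECONDITION & SPEC =====
def Spec_expand_galaxies (empty_rows : List Int) (empty_cols : List Int) (galaxies : List (Int × Int)) (stretch_factor : Int) (out : List (Int × Int)) : Prop := out = expand_galaxies_alt empty_rows empty_cols galaxies stretch_factor
instance (empty_rows : List Int) (empty_cols : List Int) (galaxies : List (Int × Int)) (stretch_factor : Int) (out : List (Int × Int)) : Decidable (Spec_expand_galaxies empty_rows empty_cols galaxies stretch_factor out) := by unfold Spec_expand_galaxies; infer_instance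

-- ===== CLAIM (what is proved, stated in full; the proofs are below) =====
def Claim_equal_expand_galaxies : Prop := ∀ (empty_rows : List Int) (empty_cols : List Int) (galaxies : List (Int × Int)) (stretch_factor : Int), Dom_expand_galaxies empty_rows empty_cols galaxies stretch_factor → Spec_expand_galaxies empty_rows empty_cols galaxies stretch_factor (expand_galaxies empty_rows empty_cols galaxies stretch_factor)

-- ===== LEMMAS AND PROOFS =====

-- sum of a 1-per-match comprehension is the match count
lemma sum_ones_filter (l : List Int) (p : Int → Bool) :
    ((l.filter p).map (fun _ => (1 : Int))).sum = (l.countP p : Int) := by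
  induction l with
  | nil => simp
  | cons h t ih =>
      by_cases hp : p h
      · simp only [List.filter_cons, List.countP_cons, hp, ite_true,
          List.map_cons, List.sum_cons, ih]
        push_cast
        ring
      · simp only [List.filter_cons, List.countP_cons, hp]
        exact ih

-- binary-search invariant: with everything left of lo below x and everything from hi on at least x,
-- countLessAux returns the number of elements of a that are < x
lemma countLessAux_eq (a : List Int) (x : Int) (hs : a.Pairwise (· ≤ ·)) :
    ∀ n lo hi, hi - lo = n → lo ≤ hi → hi ≤ a.length →
      (∀ i (h : i < a.length), i < lo → a[i] < x) →
      (∀ i (h : i < a.length), hi ≤ i → x ≤ a[i]) →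
      countLessAux a x lo hi = a.countP (fun y => decide (y < x)) := by
  intro n
  induction n using Nat.strong_induction_on with
  | _ n ih =>
    intro lo hi hn hle hhi hlow hhigh
    rw [countLessAux]
    by_cases h : lo < hi
    · simp only [h, dif_pos]
      have hmidlo : lo ≤ (lo + hi) / 2 := by omega
      have hmidhi : (lo + hi) / 2 < hi := by omega
      have hmlen : (lo + hi) / 2 < a.length := by omega
      have hget : a.getD ((lo + hi) / 2) 0 = a[(lo + hi) / 2] := List.getD_eq_getElem a 0 hmlen
      have hpw := List.pairwise_iff_getElem.mp hs
      by_cases hc : a[(lo + hi) / 2] < x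
      · simp only [hget, hc, if_pos]
        exact ih (hi - ((lo + hi) / 2 + 1)) (by omega) _ _ rfl (by omega) hhi
          (by
            intro i hilen hi'
            rcases Nat.lt_or_ge i ((lo + hi) / 2) with hlt | hge
            · exact lt_of_le_of_lt (hpw i ((lo + hi) / 2) hilen hmlen hlt) hc
            · have : i = (lo + hi) / 2 := by omega
              simpa [this] using hc)
          hhigh
      · simp only [hget, hc, if_false]
        exact ih ((lo + hi) / 2 - lo) (by omega) _ _ rfl (by omega) (by omega) hlow
          (by
            intro i hilen hi'
            rcases Nat.lt_or_ge ((lo + hi) / 2) i with hlt | hge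
            · have := hpw ((lo + hi) / 2) i hmlen hilen hlt
              omega
            · have : i = (lo + hi) / 2 := by omega
              subst this
              omega)
    · simp only [h, dif_neg, not_false_iff]
      have hlohi : lo = hi := by omega
      subst hlohi
      -- countP = lo: the first lo elements all satisfy < x, the rest none
      have hsplit : a = a.take lo ++ a.drop lo := (List.take_append_drop lo a).symm
      rw [hsplit, List.countP_append]
      have h1 : (a.take lo).countP (fun y => decide (y < x)) = lo := by
        have hlen : (a.take lo).length = lo := by simp; omega
        rw [List.countP_eq_length.mpr, hlen]
        intro y hy
        obtain ⟨i, hi, hyi⟩ := List.mem_iff_getElem.mp hy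
        have hi' : i < a.length := by simp at hi; omega
        have : (a.take lo)[i] = a[i] := List.getElem_take ..
        subst hyi
        simp only [this]
        exact decide_eq_true (hlow i hi' (by simp at hi; omega))
      have h2 : (a.drop lo).countP (fun y => decide (y < x)) = 0 := by
        rw [List.countP_eq_zero]
        intro y hy
        obtain ⟨i, hi, hyi⟩ := List.mem_iff_getElem.mp hy
        have hi' : lo + i < a.length := by simp at hi; omega
        have : (a.drop lo)[i] = a[lo + i] := List.getElem_drop ..
        subst hyi
        simp only [this]
        have := hhigh (lo + i) hi' (by omega)
        simp; omega
      omega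

lemma countLess_sorted_eq (l : List Int) (x : Int) :
    countLess (PySem.List.sorted l (fun v => v) false) x
      = l.countP (fun y => decide (y < x)) := by
  have hs : (PySem.List.sorted l (fun v => v) false).Pairwise (· ≤ ·) := by
    simpa using PySem.List.sorted_pairwise l (fun v => v)
  have hperm : (PySem.List.sorted l (fun v => v) false).Perm l :=
    PySem.List.sorted_perm l (fun v => v) false
  rw [countLess, countLessAux_eq _ x hs _ 0 _ rfl (Nat.zero_le _) le_rfl
      (by intro i h hlt; omega) (by intro i h hge; omega)]
  exact hperm.countP_eq _

-- ===== VERDICT (by name: the statement is the Claim_ definition above) =====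
theorem expand_galaxies_spec : Claim_equal_expand_galaxies := by
  intro empty_rows empty_cols galaxies stretch_factor _
  unfold Spec_expand_galaxies expand_galaxies expand_galaxies_alt
  apply List.map_congr_left
  intro g _
  rw [sum_ones_filter, sum_ones_filter, countLess_sorted_eq, countLess_sorted_eq]
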